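-- pv_equiv track=rewrite | github.com/LeonardoSeishi/Grafos | A3/coloracao.py | listaTodosSubDescrescente
-- ===== SOURCE A (Python) =====
-- def listaTodosSubDescrescente(A, vertices):
--     L = list()
--     for i in A:
--         sub = list()
--         for key, value in i.items():
--             if value == '1':
--                 sub.append(key)
--         L.append(sub)
--
--     t = len(vertices)
--     reverse = list()
--     while t > -1:
--         for i in L:
--             if len(i) == t:
--                 reverse.append(i)
--         t -= 1
--
--
--     return reverse
-- ===== SOURCE B (Python) =====
-- def listaTodosSubDescrescente(A, vertices):
--     buckets = {}
--     for i in A: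
--         sub = [key for key, value in i.items() if value == '1']
--         buckets.setdefault(len(sub), []).append(sub)
--     reverse = []
--     for t in reversed(range(len(vertices) + 1)):
--         reverse.extend(buckets.get(t, []))
--     return reverse
-- ===== Notes on version B (the rewrite author's own statement) =====
-- stated objective: faster
-- what changed: Ordering phase: instead of rescanning the whole list L once for every candidate length t (len(vertices)+1 full passes), B buckets each sublist by its length into a dict in the same pass that builds it, then emits buckets in one descending sweep over t.
import Mathlib
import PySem

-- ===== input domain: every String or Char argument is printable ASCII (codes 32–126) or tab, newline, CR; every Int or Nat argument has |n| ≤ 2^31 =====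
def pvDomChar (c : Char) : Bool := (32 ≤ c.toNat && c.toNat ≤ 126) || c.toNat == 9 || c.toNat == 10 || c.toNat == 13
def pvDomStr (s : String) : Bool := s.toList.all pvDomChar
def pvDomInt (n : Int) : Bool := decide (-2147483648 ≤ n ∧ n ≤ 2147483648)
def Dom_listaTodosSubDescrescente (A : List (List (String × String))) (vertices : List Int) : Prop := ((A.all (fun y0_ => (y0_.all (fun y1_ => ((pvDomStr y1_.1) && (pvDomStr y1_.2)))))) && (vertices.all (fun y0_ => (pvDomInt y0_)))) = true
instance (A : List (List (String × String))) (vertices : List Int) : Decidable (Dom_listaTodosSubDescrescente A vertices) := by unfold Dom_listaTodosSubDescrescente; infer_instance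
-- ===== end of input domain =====

-- B replaces A's repeated rescans of L (one per candidate length) with a length-indexed dict
-- built in one pass and a single descending sweep (objective: faster, asymptotic).

-- ===== PORT A =====
-- inner loop: sub built by appending keys whose value is '1'
def pvSubA (i : List (String × String)) : List String :=
  i.foldl (fun sub kv => if kv.2 == "1" then sub ++ [kv.1] else sub) []

-- first loop: L built by appending each sub
def pvBuildL (A : List (List (String × String))) : List (List String) :=
  A.foldl (fun L i => L ++ [pvSubA i]) []

-- one body of the while loop: scan L, appending sublists of length t
def pvPassA (L : List (List String)) (rev : List (List String)) (t : Nat) : List (List String) :=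
  L.foldl (fun rev i => if i.length == t then rev ++ [i] else rev) rev

-- 'while t > -1: …; t -= 1' with t starting at len(vertices): runs for t = len(vertices) … 0
def pvWhileA (L : List (List String)) : Nat → List (List String) → List (List String)
  | 0, rev => pvPassA L rev 0
  | Nat.succ t, rev => pvWhileA L t (pvPassA L rev (t + 1))

def listaTodosSubDescrescente (A : List (List (String × String))) (vertices : List Int) : List (List String) :=
  pvWhileA (pvBuildL A) vertices.length []

-- ===== PORT B =====
-- sub = [key for key, value in i.items() if value == '1']
def pvSubB (i : List (String × String)) : List String :=
  (i.filter (fun kv => kv.2 == "1")).map Prod.fst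

-- buckets.setdefault(len(sub), []).append(sub), one pass over A
def pvBucketsB (A : List (List (String × String))) : PySem.Dict Nat (List (List String)) :=
  A.foldl (fun d i =>
    let sub := pvSubB i
    d.modify sub.length [] (fun l => l ++ [sub])) PySem.Dict.empty

-- for t in reversed(range(len(vertices)+1)): reverse.extend(buckets.get(t, []))
def listaTodosSubDescrescente_alt (A : List (List (String × String))) (vertices : List Int) : List (List String) :=
  let buckets := pvBucketsB A
  ((List.range (vertices.length + 1)).reverse).foldl (fun rev t => rev ++ buckets.getD t []) []

-- ===== PRECONDITION & SPEC =====
def Spec_listaTodosSubDescrescente (A : List (List (String × String))) (vertices : List Int) (out : List (List String)) : Prop := out = listaTodosSubDescrescente_alt A vertices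
instance (A : List (List (String × String))) (vertices : List Int) (out : List (List String)) : Decidable (Spec_listaTodosSubDescrescente A vertices out) := by unfold Spec_listaTodosSubDescrescente; infer_instance

-- ===== CLAIM (what is proved, stated in full; the proofs are below) =====
def Claim_equal_listaTodosSubDescrescente : Prop := ∀ (A : List (List (String × String))) (vertices : List Int), Dom_listaTodosSubDescrescente A vertices → Spec_listaTodosSubDescrescente A vertices (listaTodosSubDescrescente A vertices)

-- ===== LEMMAS AND PROOFS =====

theorem pvSubA_eq (i : List (String × String)) : pvSubA i = pvSubB i := by
  have h : ∀ (l : List (String × String)) (acc : List String),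
      l.foldl (fun sub kv => if kv.2 == "1" then sub ++ [kv.1] else sub) acc
        = acc ++ (l.filter (fun kv => kv.2 == "1")).map Prod.fst := by
    intro l
    induction l with
    | nil => simp
    | cons x xs ih =>
        intro acc
        rw [List.foldl_cons, ih]
        by_cases hx : x.2 == "1" <;> simp [hx]
  simpa [pvSubA, pvSubB] using h i []

theorem pvBuildL_eq (A : List (List (String × String))) : pvBuildL A = A.map pvSubB := by
  have h : ∀ (l : List (List (String × String))) (acc : List (List String)),
      l.foldl (fun L i => L ++ [pvSubA i]) acc = acc ++ l.map pvSubB := by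
    intro l
    induction l with
    | nil => simp
    | cons x xs ih =>
        intro acc
        rw [List.foldl_cons, ih]
        simp [pvSubA_eq]
  simpa [pvBuildL] using h A []

theorem pvPassA_eq (L : List (List String)) (rev : List (List String)) (t : Nat) :
    pvPassA L rev t = rev ++ L.filter (fun i => i.length == t) := by
  induction L generalizing rev with
  | nil => simp [pvPassA]
  | cons x xs ih =>
      have hstep : pvPassA (x :: xs) rev t
          = pvPassA xs (if (x.length == t) = true then rev ++ [x] else rev) t := rfl
      rw [hstep, ih]
      by_cases hx : x.length == t <;> simp [hx]

-- the descending list of lengths visited by the while loop: [t, t-1, …, 0]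
def pvDesc : Nat → List Nat
  | 0 => [0]
  | Nat.succ t => (t + 1) :: pvDesc t

theorem pvWhileA_eq (L : List (List String)) (t : Nat) (rev : List (List String)) :
    pvWhileA L t rev = rev ++ (pvDesc t).flatMap (fun k => L.filter (fun i => i.length == k)) := by
  induction t generalizing rev with
  | zero => simp [pvWhileA, pvDesc, pvPassA_eq]
  | succ t ih => simp [pvWhileA, pvDesc, pvPassA_eq, ih]

theorem pvDesc_eq (t : Nat) : pvDesc t = (List.range (t + 1)).reverse := by
  induction t with
  | zero => simp [pvDesc, List.range_succ]
  | succ t ih => simp [pvDesc, List.range_succ, ih]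

theorem pvBucketsB_getD (A : List (List (String × String))) (k : Nat) :
    (pvBucketsB A).getD k [] = (A.map pvSubB).filter (fun s => s.length == k) := by
  have h : ∀ (l : List (List (String × String))) (d : PySem.Dict Nat (List (List String))),
      (l.foldl (fun d i =>
        let sub := pvSubB i
        d.modify sub.length [] (fun acc => acc ++ [sub])) d).getD k []
        = d.getD k [] ++ (l.map pvSubB).filter (fun s => s.length == k) := by
    intro l
    induction l with
    | nil => simp
    | cons x xs ih =>
        intro d
        by_cases hx : (pvSubB x).length = k
        · simp [List.foldl_cons, ih, hx]
        · simp [List.foldl_cons, ih, PySem.Dict.getD_modify, hx, Ne.symm hx]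
  simpa [pvBucketsB] using h A PySem.Dict.empty

theorem pvFoldlAppend (g : Nat → List (List String)) (ts : List Nat) (rev : List (List String)) :
    ts.foldl (fun rev t => rev ++ g t) rev = rev ++ ts.flatMap g := by
  induction ts generalizing rev with
  | nil => simp
  | cons x xs ih => simp [List.foldl_cons, ih]

-- ===== VERDICT (by name: the statement is the Claim_ definition above) =====
theorem listaTodosSubDescrescente_spec : Claim_equal_listaTodosSubDescrescente := by
  intro A vertices _
  unfold Spec_listaTodosSubDescrescente listaTodosSubDescrescente listaTodosSubDescrescente_alt
  rw [pvWhileA_eq, pvBuildL_eq, pvFoldlAppend, pvDesc_eq]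
  simp [pvBucketsB_getD]
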